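-- pv_equiv track=rewrite | github.com/leichangqing/intelligence_intent | src/core/nlu_engine.py | _are_intents_related
-- ===== SOURCE A (Python) =====
-- def _are_intents_related(intent1: str, intent2: str) -> bool:
--     """检查两个意图是否相关"""
--     # 定义相关意图组
--     related_groups = [
--         ['book_flight', 'check_flight_status', 'cancel_flight'],
--         ['check_balance', 'transfer_money', 'transaction_history'],
--         ['weather_query', 'travel_planning'],
--     ]
--
--     for group in related_groups:
--         if intent1 in group and intent2 in group:
--             return True
--
--     return False
-- ===== SOURCE B (Python) =====
-- def _are_intents_related(intent1: str, intent2: str) -> bool: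
--     """检查两个意图是否相关"""
--     related_groups = [
--         ['book_flight', 'check_flight_status', 'cancel_flight'],
--         ['check_balance', 'transfer_money', 'transaction_history'],
--         ['weather_query', 'travel_planning'],
--     ]
--
--     index = {}
--     for gid, group in enumerate(related_groups):
--         for intent in group:
--             index[intent] = gid
--
--     g1 = index.get(intent1)
--     g2 = index.get(intent2)
--     return g1 is not None and g1 == g2
-- ===== Notes on version B (the rewrite author's own statement) =====
-- stated objective: idiomatic
-- what changed: B builds an intent-to-group-id index dict once and decides relatedness by two lookups and an equality test, instead of A's per-group membership scan on the query path.
import Mathlib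
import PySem

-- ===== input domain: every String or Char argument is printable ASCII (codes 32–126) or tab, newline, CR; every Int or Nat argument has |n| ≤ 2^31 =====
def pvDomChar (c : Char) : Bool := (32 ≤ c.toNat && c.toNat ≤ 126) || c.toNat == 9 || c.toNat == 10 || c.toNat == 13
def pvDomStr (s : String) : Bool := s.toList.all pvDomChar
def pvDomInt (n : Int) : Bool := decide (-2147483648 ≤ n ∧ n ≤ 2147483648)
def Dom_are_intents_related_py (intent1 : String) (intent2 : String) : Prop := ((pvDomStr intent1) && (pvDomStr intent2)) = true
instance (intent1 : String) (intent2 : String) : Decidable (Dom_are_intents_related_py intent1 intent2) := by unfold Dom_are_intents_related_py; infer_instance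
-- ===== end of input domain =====

-- B replaces A's per-group membership scan by a prebuilt intent→group-id index and two lookups (idiomatic; same cost here).

-- ===== PORT A =====
-- the module-level constant table of A
def pvRelatedGroups : List (List String) :=
  [["book_flight", "check_flight_status", "cancel_flight"],
   ["check_balance", "transfer_money", "transaction_history"],
   ["weather_query", "travel_planning"]]

-- the 'for group in related_groups: if … return True' loop; falls through to False
def pvGroupLoop (intent1 : String) (intent2 : String) : List (List String) → Bool
  | [] => false
  | g :: rest => if g.contains intent1 && g.contains intent2 then true else pvGroupLoop intent1 intent2 rest

def are_intents_related_py (intent1 : String) (intent2 : String) : Bool :=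
  pvGroupLoop intent1 intent2 pvRelatedGroups

-- ===== PORT B =====
-- B's own copy of the table (it is a local literal in Source B)
def pvRelatedGroupsB : List (List String) :=
  [["book_flight", "check_flight_status", "cancel_flight"],
   ["check_balance", "transfer_money", "transaction_history"],
   ["weather_query", "travel_planning"]]

-- 'for gid, group in enumerate(related_groups): for intent in group: index[intent] = gid'
def pvBuildIndex : PySem.Dict String Int :=
  (PySem.List.enumerate pvRelatedGroupsB).foldl
    (fun d p => p.2.foldl (fun d' intent => PySem.Dict.insert d' intent p.1) d)
    (PySem.Dict.empty : PySem.Dict String Int)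

def are_intents_related_py_alt (intent1 : String) (intent2 : String) : Bool :=
  let index := pvBuildIndex
  let g1 := PySem.Dict.get? index intent1
  let g2 := PySem.Dict.get? index intent2
  g1.isSome && g1 == g2

-- ===== PRECONDITION & SPEC =====
def Spec_are_intents_related_py (intent1 : String) (intent2 : String) (out : Bool) : Prop := out = are_intents_related_py_alt intent1 intent2
instance (intent1 : String) (intent2 : String) (out : Bool) : Decidable (Spec_are_intents_related_py intent1 intent2 out) := by unfold Spec_are_intents_related_py; infer_instance

-- ===== CLAIM (what is proved, stated in full; the proofs are below) =====
def Claim_equal_are_intents_related_py : Prop := ∀ (intent1 : String) (intent2 : String), Dom_are_intents_related_py intent1 intent2 → Spec_are_intents_related_py intent1 intent2 (are_intents_related_py intent1 intent2)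

-- ===== LEMMAS AND PROOFS =====

-- the eight intent names occurring in the table
def pvAllIntents : List String :=
  ["book_flight", "check_flight_status", "cancel_flight",
   "check_balance", "transfer_money", "transaction_history",
   "weather_query", "travel_planning"]

theorem pv_A_unknown (i1 i2 : String) (h : i1 ∉ pvAllIntents) :
    are_intents_related_py i1 i2 = false := by
  simp [pvAllIntents] at h
  obtain ⟨h1, h2, h3, h4, h5, h6, h7, h8⟩ := h
  simp [are_intents_related_py, pvRelatedGroups, pvGroupLoop, h1, h2, h3, h4, h5, h6, h7, h8]

theorem pv_index_eq : pvBuildIndex = PySem.Dict.mk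
    [("book_flight", 0), ("check_flight_status", 0), ("cancel_flight", 0),
     ("check_balance", 1), ("transfer_money", 1), ("transaction_history", 1),
     ("weather_query", 2), ("travel_planning", 2)] := rfl

theorem pv_B_unknown (i1 i2 : String) (h : i1 ∉ pvAllIntents) :
    are_intents_related_py_alt i1 i2 = false := by
  simp [pvAllIntents] at h
  obtain ⟨h1, h2, h3, h4, h5, h6, h7, h8⟩ := h
  simp [are_intents_related_py_alt, pv_index_eq, PySem.Dict.get?_mk_cons, PySem.Dict.get?,
    Ne.symm h1, Ne.symm h2, Ne.symm h3, Ne.symm h4, Ne.symm h5, Ne.symm h6, Ne.symm h7, Ne.symm h8]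

theorem pv_A_unknown2 (i1 i2 : String) (h : i2 ∉ pvAllIntents) :
    are_intents_related_py i1 i2 = false := by
  simp [pvAllIntents] at h
  obtain ⟨h1, h2, h3, h4, h5, h6, h7, h8⟩ := h
  simp [are_intents_related_py, pvRelatedGroups, pvGroupLoop, h1, h2, h3, h4, h5, h6, h7, h8]

theorem pv_B_unknown2 (i1 i2 : String) (h : i2 ∉ pvAllIntents) :
    are_intents_related_py_alt i1 i2 = false := by
  simp [pvAllIntents] at h
  obtain ⟨h1, h2, h3, h4, h5, h6, h7, h8⟩ := h
  simp [are_intents_related_py_alt, pv_index_eq, PySem.Dict.get?_mk_cons, PySem.Dict.get?,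
    Ne.symm h1, Ne.symm h2, Ne.symm h3, Ne.symm h4, Ne.symm h5, Ne.symm h6, Ne.symm h7, Ne.symm h8]

theorem pv_eq (i1 i2 : String) : are_intents_related_py i1 i2 = are_intents_related_py_alt i1 i2 := by
  by_cases h1 : i1 ∈ pvAllIntents
  · by_cases h2 : i2 ∈ pvAllIntents
    · simp [pvAllIntents] at h1 h2
      rcases h1 with h1|h1|h1|h1|h1|h1|h1|h1 <;> rcases h2 with h2|h2|h2|h2|h2|h2|h2|h2 <;>
        subst h1 <;> subst h2 <;> decide
    · rw [pv_A_unknown2 _ _ h2, pv_B_unknown2 _ _ h2]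
  · rw [pv_A_unknown _ _ h1, pv_B_unknown _ _ h1]

-- ===== VERDICT (by name: the statement is the Claim_ definition above) =====
theorem are_intents_related_py_spec : Claim_equal_are_intents_related_py := by
  intro i1 i2 _
  unfold Spec_are_intents_related_py
  exact pv_eq i1 i2
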